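-- pv_equiv track=rewrite | github.com/lhartmann/ch32v003_colossal_cave_adventure | compress.py | codegen
-- ===== SOURCE A (Python) =====
-- def codegen(txt, brk, depth, prefix = ""):
--     if depth == 0:
--         return []
--     r = []
--     for digit in txt[0:brk]:
--         r.append(prefix+digit)
--     for digit in txt[brk:]:
--         r = r + codegen(txt, brk, depth-1, prefix+digit)
--     return r
-- ===== SOURCE B (Python) =====
-- def codegen(txt, brk, depth, prefix = ""):
--     # Iterative DFS with an explicit stack instead of recursion.
--     out = []
--     stack = [(prefix, depth)]
--     while stack:
--         p, d = stack.pop()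
--         if d == 0:
--             continue
--         for c in txt[0:brk]:
--             out.append(p + c)
--         for c in reversed(txt[brk:]):
--             stack.append((p + c, d - 1))
--     return out
-- ===== Notes on version B (the rewrite author's own statement) =====
-- stated objective: alternative
-- what changed: A's recursive descent is replaced by an iterative DFS over an explicit stack of (prefix, depth) nodes that emits terminal codes on pop and pushes branch children in reverse so the output order is identical.
import Mathlib
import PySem

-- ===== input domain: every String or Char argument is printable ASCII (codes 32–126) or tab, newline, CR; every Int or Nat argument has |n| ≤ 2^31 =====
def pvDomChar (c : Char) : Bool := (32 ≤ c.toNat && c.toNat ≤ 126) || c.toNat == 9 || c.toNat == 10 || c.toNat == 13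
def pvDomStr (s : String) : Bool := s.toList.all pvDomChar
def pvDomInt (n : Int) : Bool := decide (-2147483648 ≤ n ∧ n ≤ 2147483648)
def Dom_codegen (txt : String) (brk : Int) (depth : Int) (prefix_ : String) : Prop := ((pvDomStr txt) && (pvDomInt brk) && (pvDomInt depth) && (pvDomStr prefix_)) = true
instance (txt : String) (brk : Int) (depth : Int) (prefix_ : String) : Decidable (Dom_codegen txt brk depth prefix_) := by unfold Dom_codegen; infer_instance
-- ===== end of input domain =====

-- B replaces A's recursion by an iterative DFS over an explicit stack of (prefix, depth)
-- nodes (objective: alternative decomposition, same output order and cost).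

-- ===== PORT A =====
-- Literal port of A's recursion; the Nat `fuel` mirrors `depth` to make the recursion
-- structural (inside Pre_ it equals depth.toNat and never runs out before dep = 0;
-- the fuel-exhausted arm returns the already-built r, reached only when the branch
-- loop would iterate zero times or outside Pre_).
def codegenGo (txt : List Char) (brk : Int) (fuel : Nat) (dep : Int) (pre : List Char) : List String :=
  if dep = 0 then []
  else
    let r := (PySem.List.slice txt (some 0) (some brk)).foldl
      (fun r d => r ++ [String.mk (pre ++ [d])]) []
    match fuel with
    | 0 => r
    | Nat.succ n =>
      (PySem.List.slice txt (some brk) none).foldl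
        (fun r d => r ++ codegenGo txt brk n (dep - 1) (pre ++ [d])) r

def codegen (txt : String) (brk : Int) (depth : Int) (prefix_ : String) : List String :=
  codegenGo txt.toList brk depth.toNat depth prefix_.toList

-- ===== PORT B =====
-- helper for the termination measure of the stack loop
def pvStackMeasure (b : Nat) (st : List (List Char × Nat × Int)) : Nat :=
  (st.map (fun x => (b + 1) ^ x.2.1)).sum

theorem pvSumMapConst {α : Type} (l : List α) (c : Nat) :
    (l.map (fun _ => c)).sum = l.length * c := by
  induction l with
  | nil => simp
  | cons a l ih => simp [ih, Nat.succ_mul, Nat.add_comm]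

-- the while-loop of Source B: pop the top node, skip it if depth 0, otherwise emit the
-- terminal codes and push the branch children (first child on top).  The Nat `fuel`
-- component mirrors the Int depth exactly as in port A.
def codegenAltGo (term branch : List Char) (stack : List (List Char × Nat × Int))
    (out : List String) : List String :=
  match stack with
  | [] => out
  | (p, 0, d) :: rest =>
    if d = 0 then codegenAltGo term branch rest out
    else codegenAltGo term branch rest (out ++ term.map (fun c => String.mk (p ++ [c])))
  | (p, Nat.succ n, d) :: rest =>
    if d = 0 then codegenAltGo term branch rest out
    else
      codegenAltGo term branch ((branch.map (fun c => (p ++ [c], n, d - 1))) ++ rest)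
        (out ++ term.map (fun c => String.mk (p ++ [c])))
termination_by pvStackMeasure branch.length stack
decreasing_by
  all_goals simp only [pvStackMeasure, List.map_cons, List.sum_cons, List.map_append,
    List.sum_append, List.map_map, Function.comp_def, List.length_attach,
    Nat.succ_eq_add_one, pow_zero, pvSumMapConst]
  · omega
  · omega
  · have : 0 < (branch.length + 1) ^ (n + 1) := Nat.pow_pos (by omega)
    omega
  · have h0 : 0 < (branch.length + 1) ^ n := Nat.pow_pos (by omega)
    have h2 : branch.length * ((branch.length + 1) ^ n) + (branch.length + 1) ^ n
        = (branch.length + 1) ^ (n + 1) := by ring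
    omega

def codegen_alt (txt : String) (brk : Int) (depth : Int) (prefix_ : String) : List String :=
  codegenAltGo (PySem.List.slice txt.toList (some 0) (some brk))
    (PySem.List.slice txt.toList (some brk) none)
    [(prefix_.toList, depth.toNat, depth)] []

-- ===== PRECONDITION & SPEC =====
-- Pre_ excludes depth < 0 together with a nonempty txt[brk:], where Python A recurses
-- without a base case and raises RecursionError (B loops there too).
def Pre_codegen (txt : String) (brk : Int) (depth : Int) (prefix_ : String) : Prop :=
  0 ≤ depth ∨ PySem.List.slice txt.toList (some brk) none = []
instance (txt : String) (brk : Int) (depth : Int) (prefix_ : String) : Decidable (Pre_codegen txt brk depth prefix_) := by unfold Pre_codegen; infer_instance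

def pvWitness_codegen : String × Int × Int × String := ("abc", 1, 2, "")

def Spec_codegen (txt : String) (brk : Int) (depth : Int) (prefix_ : String) (out : List String) : Prop := out = codegen_alt txt brk depth prefix_
instance (txt : String) (brk : Int) (depth : Int) (prefix_ : String) (out : List String) : Decidable (Spec_codegen txt brk depth prefix_ out) := by unfold Spec_codegen; infer_instance

-- ===== CLAIM (what is proved, stated in full; the proofs are below) =====
def Claim_equal_codegen : Prop := ∀ (txt : String) (brk : Int) (depth : Int) (prefix_ : String), Dom_codegen txt brk depth prefix_ → Pre_codegen txt brk depth prefix_ → Spec_codegen txt brk depth prefix_ (codegen txt brk depth prefix_)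

-- ===== LEMMAS AND PROOFS =====

theorem codegenGo_d0 (txt : List Char) (brk : Int) (f : Nat) (pre : List Char) :
    codegenGo txt brk f 0 pre = [] := by
  simp [codegenGo]

theorem codegenGo_fuel0 (txt : List Char) (brk : Int) (d : Int) (pre : List Char)
    (hd : d ≠ 0) :
    codegenGo txt brk 0 d pre
      = (PySem.List.slice txt (some 0) (some brk)).map (fun c => String.mk (pre ++ [c])) := by
  simp only [codegenGo, if_neg hd, PySem.List.foldl_append_singleton_eq_map, List.nil_append]

theorem codegenGo_succ (txt : List Char) (brk : Int) (n : Nat) (d : Int) (pre : List Char)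
    (hd : d ≠ 0) :
    codegenGo txt brk (n + 1) d pre
      = (PySem.List.slice txt (some 0) (some brk)).map (fun c => String.mk (pre ++ [c]))
        ++ (PySem.List.slice txt (some brk) none).flatMap
            (fun c => codegenGo txt brk n (d - 1) (pre ++ [c])) := by
  conv_lhs => rw [codegenGo]
  simp only [if_neg hd, PySem.List.foldl_append_eq_flatMap,
    List.nil_append, ← List.map_eq_flatMap]

theorem codegenAltGo_bounded (txt : List Char) (brk : Int) :
    ∀ (k : Nat) (stack : List (List Char × Nat × Int)) (out : List String),
      pvStackMeasure (PySem.List.slice txt (some brk) none).length stack ≤ k →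
      codegenAltGo (PySem.List.slice txt (some 0) (some brk))
          (PySem.List.slice txt (some brk) none) stack out
        = out ++ (stack.map (fun x => codegenGo txt brk x.2.1 x.2.2 x.1)).flatten := by
  intro k
  induction k with
  | zero =>
    intro stack out h
    cases stack with
    | nil => simp [codegenAltGo]
    | cons a rest =>
      exfalso
      have : 0 < ((PySem.List.slice txt (some brk) none).length + 1) ^ a.2.1 :=
        Nat.pow_pos (by omega)
      simp only [pvStackMeasure, List.map_cons, List.sum_cons] at h
      omega
  | succ k ih =>
    intro stack out h
    match stack with
    | [] => simp [codegenAltGo]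
    | (p, f, d) :: rest =>
      simp only [pvStackMeasure, List.map_cons, List.sum_cons] at h
      have hrest : pvStackMeasure (PySem.List.slice txt (some brk) none).length rest ≤ k := by
        have : 0 < ((PySem.List.slice txt (some brk) none).length + 1) ^ f :=
          Nat.pow_pos (by omega)
        unfold pvStackMeasure; omega
      cases f with
      | zero =>
        rw [codegenAltGo]
        by_cases hd : d = 0
        · subst hd
          rw [if_pos rfl, ih rest out hrest]
          simp [codegenGo_d0]
        · rw [if_neg hd, ih rest _ hrest]
          simp [codegenGo_fuel0 txt brk d _ hd]
      | succ n =>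
        rw [codegenAltGo]
        by_cases hd : d = 0
        · subst hd
          rw [if_pos rfl, ih rest out hrest]
          simp [codegenGo_d0]
        · rw [if_neg hd]
          have h0 : 0 < ((PySem.List.slice txt (some brk) none).length + 1) ^ n :=
            Nat.pow_pos (by omega)
          have h2 : (PySem.List.slice txt (some brk) none).length *
                (((PySem.List.slice txt (some brk) none).length + 1) ^ n)
              + ((PySem.List.slice txt (some brk) none).length + 1) ^ n
              = ((PySem.List.slice txt (some brk) none).length + 1) ^ (n + 1) := by ring
          have hm : pvStackMeasure (PySem.List.slice txt (some brk) none).length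
              (((PySem.List.slice txt (some brk) none).map (fun c => (p ++ [c], n, d - 1)))
                ++ rest) ≤ k := by
            simp only [pvStackMeasure, List.map_append, List.sum_append, List.map_map,
              Function.comp_def, pvSumMapConst]
            omega
          rw [ih _ _ hm]
          simp only [List.map_append, List.flatten_append, List.map_map,
            Function.comp_def, List.map_cons, List.flatten_cons,
            codegenGo_succ txt brk n d _ hd, List.flatMap_def, List.append_assoc]

-- ===== VERDICT (by name: the statement is the Claim_ definition above) =====
theorem codegen_spec : Claim_equal_codegen := by
  intro txt brk depth prefix_ _ _
  unfold Spec_codegen codegen codegen_alt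
  rw [codegenAltGo_bounded txt.toList brk _ _ _ (Nat.le_refl _)]
  simp
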